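-- pv_equiv track=rewrite | github.com/ge-xiao/emergency-priority-rl | net/manhattan/build_file.py | output_tls
-- ===== SOURCE A (Python) =====
-- def output_tls(ids,phases):
--     tls = '  <tlLogic id="%s" programID="1" offset="0" type="static">\n'
--     phase = '    <phase duration="%d" state="%s"/>\n'
--
--     tls_str = ''
--
--     #phase_duration = [30, 3]
--     phase_duration = [5, 2]
--     for id in ids:
--         node = id
--         tls_str += tls % node
--         for k, p in enumerate(phases):
--             tls_str += phase % (phase_duration[k % 2], p)
--         tls_str += '  </tlLogic>\n'
--     return tls_str
-- ===== SOURCE B (Python) =====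
-- def output_tls(ids, phases):
--     # Recursive decomposition: phase lines are produced by consuming phases two at a
--     # time (duration 5 then 2), with no index arithmetic; the body is assembled by
--     # recursion over ids.
--     def phase_lines(ps):
--         if not ps:
--             return ''
--         if len(ps) == 1:
--             return '    <phase duration="5" state="%s"/>\n' % ps[0]
--         return ('    <phase duration="5" state="%s"/>\n' % ps[0]
--                 + '    <phase duration="2" state="%s"/>\n' % ps[1]
--                 + phase_lines(ps[2:]))
--     def go(rest):
--         if not rest:
--             return ''
--         return ('  <tlLogic id="%s" programID="1" offset="0" type="static">\n' % rest[0]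
--                 + phase_lines(phases)
--                 + '  </tlLogic>\n'
--                 + go(rest[1:]))
--     return go(ids)
-- ===== Notes on version B (the rewrite author's own statement) =====
-- stated objective: alternative
-- what changed: Replaces the iterative string-accumulator with enumerate and k%2 duration lookup by pure recursion: phase lines are generated by consuming phases two at a time (literal durations 5 then 2, no index arithmetic), and the per-id blocks by structural recursion over ids.
import Mathlib
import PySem

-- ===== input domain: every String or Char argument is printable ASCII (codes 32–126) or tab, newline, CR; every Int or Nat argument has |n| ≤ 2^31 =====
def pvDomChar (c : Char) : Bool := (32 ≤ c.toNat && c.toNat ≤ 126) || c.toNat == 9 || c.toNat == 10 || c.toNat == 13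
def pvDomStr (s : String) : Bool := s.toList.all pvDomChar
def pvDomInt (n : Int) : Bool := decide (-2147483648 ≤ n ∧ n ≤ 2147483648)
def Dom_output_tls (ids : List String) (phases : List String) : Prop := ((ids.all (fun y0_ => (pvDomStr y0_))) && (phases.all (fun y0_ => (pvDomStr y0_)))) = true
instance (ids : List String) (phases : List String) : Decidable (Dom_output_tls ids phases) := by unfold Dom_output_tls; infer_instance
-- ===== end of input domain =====

-- B replaces the iterative accumulator with enumerate/k%2 lookup by pure recursion:
-- phases are consumed two at a time with literal durations, ids by structural recursion
-- (objective: alternative decomposition, same cost).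

-- ===== PORT A =====
-- 'tls % node' / 'phase % (d, p)' with these literal format strings are exactly these concatenations
def pvTls (node : String) : String :=
  "  <tlLogic id=\"" ++ node ++ "\" programID=\"1\" offset=\"0\" type=\"static\">\n"
def pvPhase (d : Int) (p : String) : String :=
  "    <phase duration=\"" ++ PySem.Int.toStr d ++ "\" state=\"" ++ p ++ "\"/>\n"
def pvPhaseDuration : List Int := [5, 2]

def output_tls (ids : List String) (phases : List String) : String :=
  ids.foldl (fun tls_str id =>
    let node := id
    let tls_str := tls_str ++ pvTls node
    let tls_str := (PySem.List.enumerate phases).foldl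
      (fun s kp => s ++ pvPhase (PySem.List.pyGetD pvPhaseDuration (PySem.Int.mod kp.1 2) 0) kp.2)
      tls_str
    tls_str ++ "  </tlLogic>\n") ""

-- ===== PORT B =====
-- phase_lines: consume phases two at a time, literal durations "5" then "2"
def pvLine5 (p : String) : String := "    <phase duration=\"5\" state=\"" ++ p ++ "\"/>\n"
def pvLine2 (p : String) : String := "    <phase duration=\"2\" state=\"" ++ p ++ "\"/>\n"

def pvPhaseLines : List String → String
  | [] => ""
  | [p] => pvLine5 p
  | p :: q :: rest => pvLine5 p ++ pvLine2 q ++ pvPhaseLines rest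

-- go: structural recursion over ids
def pvGo (phases : List String) : List String → String
  | [] => ""
  | id :: rest =>
      "  <tlLogic id=\"" ++ id ++ "\" programID=\"1\" offset=\"0\" type=\"static\">\n"
        ++ pvPhaseLines phases ++ "  </tlLogic>\n" ++ pvGo phases rest

def output_tls_alt (ids : List String) (phases : List String) : String :=
  pvGo phases ids

-- ===== PRECONDITION & SPEC =====
def Spec_output_tls (ids : List String) (phases : List String) (out : String) : Prop := out = output_tls_alt ids phases
instance (ids : List String) (phases : List String) (out : String) : Decidable (Spec_output_tls ids phases out) := by unfold Spec_output_tls; infer_instance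

-- ===== CLAIM (what is proved, stated in full; the proofs are below) =====
def Claim_equal_output_tls : Prop := ∀ (ids : List String) (phases : List String), Dom_output_tls ids phases → Spec_output_tls ids phases (output_tls ids phases)

-- ===== LEMMAS AND PROOFS =====

theorem pv_toStr_five : PySem.Int.toStr 5 = "5" := by decide
theorem pv_toStr_two : PySem.Int.toStr 2 = "2" := by decide

theorem pv_phase_five (p : String) : pvPhase 5 p = pvLine5 p := by
  simp [pvPhase, pvLine5, pv_toStr_five]

theorem pv_phase_two (p : String) : pvPhase 2 p = pvLine2 p := by
  simp [pvPhase, pvLine2, pv_toStr_two]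

-- A's inner enumerate-fold, started at an even index, produces B's recursive phase block
theorem pv_phase_fold (ps : List String) :
    ∀ (s : Int) (acc : String), PySem.Int.mod s 2 = 0 →
    (PySem.List.enumerate ps s).foldl
      (fun t kp => t ++ pvPhase (PySem.List.pyGetD pvPhaseDuration (PySem.Int.mod kp.1 2) 0) kp.2)
      acc = acc ++ pvPhaseLines ps := by
  induction ps using pvPhaseLines.induct with
  | case1 => intro s acc _; simp [PySem.List.enumerate_nil, pvPhaseLines]
  | case2 p =>
      intro s acc hs
      rw [PySem.Int.mod_eq_emod_of_pos (by omega)] at hs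
      simp [PySem.List.enumerate_cons, PySem.List.enumerate_nil, pvPhaseLines, hs,
            pvPhaseDuration, PySem.List.pyGetD_zero_cons, pv_phase_five]
  | case3 p q rest ih =>
      intro s acc hs
      rw [PySem.Int.mod_eq_emod_of_pos (by omega)] at hs
      have h2 : PySem.Int.mod (s + 1 + 1) 2 = 0 := by
        rw [PySem.Int.mod_eq_emod_of_pos (by omega)]; omega
      have h1e : (s + 1) % 2 = 1 := by omega
      simp only [PySem.List.enumerate_cons, List.foldl_cons]
      rw [ih (s + 1 + 1) _ h2]
      simp [pvPhaseLines, pvPhaseDuration, PySem.List.pyGetD, hs, h1e,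
            pv_phase_five, pv_phase_two, String.append_assoc]

-- A's outer fold over ids produces B's recursion, with the accumulator factored out
theorem pv_ids_fold (phases : List String) (ids : List String) :
    ∀ (acc : String),
    ids.foldl (fun tls_str id =>
      ((PySem.List.enumerate phases).foldl
        (fun s kp => s ++ pvPhase (PySem.List.pyGetD pvPhaseDuration (PySem.Int.mod kp.1 2) 0) kp.2)
        (tls_str ++ pvTls id)) ++ "  </tlLogic>\n") acc = acc ++ pvGo phases ids := by
  induction ids with
  | nil => intro acc; simp [pvGo]
  | cons id rest ih =>
      intro acc
      simp only [List.foldl_cons]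
      rw [pv_phase_fold phases 0 _ (by decide), ih]
      simp [pvGo, pvTls, String.append_assoc]

-- ===== VERDICT (by name: the statement is the Claim_ definition above) =====
theorem output_tls_spec : Claim_equal_output_tls := by
  intro ids phases _
  unfold Spec_output_tls output_tls output_tls_alt
  simpa using pv_ids_fold phases ids ""
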